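-- pv_equiv track=rewrite | github.com/reliable-agents-ai/triads | scripts/generate_workflow_schema.py | infer_triad_type
-- ===== SOURCE A (Python) =====
-- def infer_triad_type(triad_id: str) -> str:
--     """Infer triad type from ID using keyword matching.
--
--     Args:
--         triad_id: Triad identifier (directory name)
--
--     Returns:
--         Triad type: research, planning, execution, quality, or release
--
--     Examples:
--         >>> infer_triad_type("idea-validation")
--         'research'
--         >>> infer_triad_type("design")
--         'planning'
--         >>> infer_triad_type("implementation")
--         'execution'
--         >>> infer_triad_type("garden-tending")
--         'quality'
--         >>> infer_triad_type("deployment")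
--         'release'
--     """
--     triad_lower = triad_id.lower()
--
--     # Quality keywords (check first because it overlaps with research)
--     quality_keywords = [
--         "test", "review", "quality", "tending", "garden", "refactor",
--         "cleanup", "polish", "qa", "audit"
--     ]
--     if any(kw in triad_lower for kw in quality_keywords):
--         return "quality"
--
--     # Research keywords
--     research_keywords = [
--         "research", "discovery", "analysis", "investigate", "explore",
--         "validation", "rfp-analysis", "requirements", "study"
--     ]
--     if any(kw in triad_lower for kw in research_keywords):
--         return "research"
--
--     # Planning keywords
--     planning_keywords = [
--         "design", "plan", "strategy", "architect", "proposal", "rfp-strategy",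
--         "roadmap", "spec", "blueprint"
--     ]
--     if any(kw in triad_lower for kw in planning_keywords):
--         return "planning"
--
--     # Execution keywords
--     execution_keywords = [
--         "implement", "build", "create", "develop", "write", "coding",
--         "construction", "generation", "execution", "drafting", "rfp-creation"
--     ]
--     if any(kw in triad_lower for kw in execution_keywords):
--         return "execution"
--
--     # Release keywords
--     release_keywords = [
--         "deploy", "release", "publish", "ship", "delivery", "launch",
--         "submission", "finalize"
--     ]
--     if any(kw in triad_lower for kw in release_keywords):
--         return "release"
--
--     # Default to execution for unknown
--     return "execution"
-- ===== SOURCE B (Python) =====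
-- # Exhaustive match + argmin: collect the priority ranks of ALL matching keywords
-- # from one flat keyword->rank list, then return the label of the smallest rank.
-- _RANKED = [
--     ("test", 0), ("review", 0), ("quality", 0), ("tending", 0), ("garden", 0),
--     ("refactor", 0), ("cleanup", 0), ("polish", 0), ("qa", 0), ("audit", 0),
--     ("research", 1), ("discovery", 1), ("analysis", 1), ("investigate", 1),
--     ("explore", 1), ("validation", 1), ("rfp-analysis", 1), ("requirements", 1),
--     ("study", 1),
--     ("design", 2), ("plan", 2), ("strategy", 2), ("architect", 2),
--     ("proposal", 2), ("rfp-strategy", 2), ("roadmap", 2), ("spec", 2),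
--     ("blueprint", 2),
--     ("implement", 3), ("build", 3), ("create", 3), ("develop", 3), ("write", 3),
--     ("coding", 3), ("construction", 3), ("generation", 3), ("execution", 3),
--     ("drafting", 3), ("rfp-creation", 3),
--     ("deploy", 4), ("release", 4), ("publish", 4), ("ship", 4), ("delivery", 4),
--     ("launch", 4), ("submission", 4), ("finalize", 4),
-- ]
-- _LABELS = ["quality", "research", "planning", "execution", "release"]
--
--
-- def infer_triad_type(triad_id: str) -> str:
--     """Infer triad type: rank every matching keyword, return the best-ranked label."""
--     low = triad_id.lower()
--     hits = [rank for kw, rank in _RANKED if kw in low]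
--     return _LABELS[min(hits)] if hits else "execution"
-- ===== Notes on version B (the rewrite author's own statement) =====
-- stated objective: alternative
-- what changed: A short-circuits through five ordered per-category any-substring checks; B instead makes one exhaustive pass over a flat keyword->priority-rank list, collects the ranks of ALL matching keywords, and returns the label of the minimum rank (argmin), 'execution' when nothing matches.
import Mathlib
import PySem

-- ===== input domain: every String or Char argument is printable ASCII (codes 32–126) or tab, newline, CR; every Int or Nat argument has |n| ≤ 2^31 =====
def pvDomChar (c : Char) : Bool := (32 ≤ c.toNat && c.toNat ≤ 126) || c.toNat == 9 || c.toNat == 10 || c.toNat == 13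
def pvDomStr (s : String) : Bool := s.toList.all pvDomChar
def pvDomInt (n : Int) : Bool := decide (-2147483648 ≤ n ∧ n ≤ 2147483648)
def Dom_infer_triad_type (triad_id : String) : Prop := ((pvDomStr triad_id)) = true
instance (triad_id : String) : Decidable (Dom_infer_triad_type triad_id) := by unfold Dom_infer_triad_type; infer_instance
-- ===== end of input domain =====

-- B replaces A's ordered early-exit per-category checks by one exhaustive pass over a flat
-- keyword->rank list followed by an argmin over the collected ranks; same return value.

-- ===== PORT A =====
def infer_triad_type (triad_id : String) : String :=
  let triad_lower := PySem.Str.lower triad_id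
  let quality_keywords := ["test", "review", "quality", "tending", "garden", "refactor",
    "cleanup", "polish", "qa", "audit"]
  if quality_keywords.any (fun kw => PySem.Str.isIn kw triad_lower) then "quality"
  else
  let research_keywords := ["research", "discovery", "analysis", "investigate", "explore",
    "validation", "rfp-analysis", "requirements", "study"]
  if research_keywords.any (fun kw => PySem.Str.isIn kw triad_lower) then "research"
  else
  let planning_keywords := ["design", "plan", "strategy", "architect", "proposal",
    "rfp-strategy", "roadmap", "spec", "blueprint"]
  if planning_keywords.any (fun kw => PySem.Str.isIn kw triad_lower) then "planning"
  else
  let execution_keywords := ["implement", "build", "create", "develop", "write", "coding",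
    "construction", "generation", "execution", "drafting", "rfp-creation"]
  if execution_keywords.any (fun kw => PySem.Str.isIn kw triad_lower) then "execution"
  else
  let release_keywords := ["deploy", "release", "publish", "ship", "delivery", "launch",
    "submission", "finalize"]
  if release_keywords.any (fun kw => PySem.Str.isIn kw triad_lower) then "release"
  else "execution"

-- ===== PORT B =====
def pvRanked : List (String × Nat) :=
  [("test", 0), ("review", 0), ("quality", 0), ("tending", 0), ("garden", 0),
   ("refactor", 0), ("cleanup", 0), ("polish", 0), ("qa", 0), ("audit", 0),
   ("research", 1), ("discovery", 1), ("analysis", 1), ("investigate", 1),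
   ("explore", 1), ("validation", 1), ("rfp-analysis", 1), ("requirements", 1),
   ("study", 1),
   ("design", 2), ("plan", 2), ("strategy", 2), ("architect", 2),
   ("proposal", 2), ("rfp-strategy", 2), ("roadmap", 2), ("spec", 2),
   ("blueprint", 2),
   ("implement", 3), ("build", 3), ("create", 3), ("develop", 3), ("write", 3),
   ("coding", 3), ("construction", 3), ("generation", 3), ("execution", 3),
   ("drafting", 3), ("rfp-creation", 3),
   ("deploy", 4), ("release", 4), ("publish", 4), ("ship", 4), ("delivery", 4),
   ("launch", 4), ("submission", 4), ("finalize", 4)]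

def pvLabels : List String := ["quality", "research", "planning", "execution", "release"]

def infer_triad_type_alt (triad_id : String) : String :=
  let low := PySem.Str.lower triad_id
  let hits := pvRanked.filterMap (fun p => if PySem.Str.isIn p.1 low then some p.2 else none)
  -- min(hits) via PySem.List.min?; _LABELS[min(hits)] is exact via getD since every rank < 5
  match PySem.List.min? hits (fun x => x) with
  | some m => pvLabels.getD m "execution"
  | none => "execution"

-- ===== PRECONDITION & SPEC =====
def Spec_infer_triad_type (triad_id : String) (out : String) : Prop := out = infer_triad_type_alt triad_id
instance (triad_id : String) (out : String) : Decidable (Spec_infer_triad_type triad_id out) := by unfold Spec_infer_triad_type; infer_instance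

-- ===== CLAIM (what is proved, stated in full; the proofs are below) =====
def Claim_equal_infer_triad_type : Prop := ∀ (triad_id : String), Dom_infer_triad_type triad_id → Spec_infer_triad_type triad_id (infer_triad_type triad_id)

-- ===== LEMMAS AND PROOFS =====

-- filterMap of a constant-rank keyword group collapses to a constant map over the filtered group
theorem pv_fm_group (q : String → Bool) (g : List String) (k : Nat) :
    List.filterMap (fun p : String × Nat => if q p.1 then some p.2 else none)
        (g.map (fun s => (s, k))) = (g.filter q).map (fun _ => k) := by
  induction g with
  | nil => rfl
  | cons a t ih => by_cases h : q a <;> simp [h, ih]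

-- the first extremal min? (key = id) of a Nat list is its least member
theorem pv_min?_eq (l : List Nat) (k : Nat) (hk : k ∈ l) (hmin : ∀ x ∈ l, k ≤ x) :
    PySem.List.min? l (fun x => x) = some k := by
  cases h : PySem.List.min? l (fun x => x) with
  | none =>
      rw [PySem.List.min?_eq_none_iff] at h
      subst h; cases hk
  | some m =>
      have hm := PySem.List.min?_mem h
      have h2 := PySem.List.min?_isMin h k hk
      have h3 := hmin m hm
      simp only [Nat.le_antisymm h2 h3]

theorem pv_filter_nil (q : String → Bool) (g : List String)
    (h : ¬ g.any q = true) : g.filter q = [] := by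
  rw [List.filter_eq_nil_iff]
  intro a ha
  exact fun hq => h (List.any_eq_true.mpr ⟨a, ha, hq⟩)

-- the two bodies agree for ANY match predicate q (instantiated with substring-of-lowered-id)
theorem pv_chain_eq (q : String → Bool) :
    (if List.any ["test", "review", "quality", "tending", "garden", "refactor",
        "cleanup", "polish", "qa", "audit"] q then "quality"
     else if List.any ["research", "discovery", "analysis", "investigate", "explore",
        "validation", "rfp-analysis", "requirements", "study"] q then "research"
     else if List.any ["design", "plan", "strategy", "architect", "proposal",
        "rfp-strategy", "roadmap", "spec", "blueprint"] q then "planning"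
     else if List.any ["implement", "build", "create", "develop", "write", "coding",
        "construction", "generation", "execution", "drafting", "rfp-creation"] q then "execution"
     else if List.any ["deploy", "release", "publish", "ship", "delivery", "launch",
        "submission", "finalize"] q then "release"
     else "execution")
    = (match PySem.List.min?
          (pvRanked.filterMap (fun p => if q p.1 then some p.2 else none)) (fun x => x) with
       | some m => pvLabels.getD m "execution"
       | none => "execution") := by
  have hsplit : pvRanked.filterMap (fun p => if q p.1 then some p.2 else none)
      = (List.filter q ["test", "review", "quality", "tending", "garden", "refactor",
          "cleanup", "polish", "qa", "audit"]).map (fun _ => 0)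
        ++ (List.filter q ["research", "discovery", "analysis", "investigate", "explore",
          "validation", "rfp-analysis", "requirements", "study"]).map (fun _ => 1)
        ++ (List.filter q ["design", "plan", "strategy", "architect", "proposal",
          "rfp-strategy", "roadmap", "spec", "blueprint"]).map (fun _ => 2)
        ++ (List.filter q ["implement", "build", "create", "develop", "write", "coding",
          "construction", "generation", "execution", "drafting", "rfp-creation"]).map (fun _ => 3)
        ++ (List.filter q ["deploy", "release", "publish", "ship", "delivery", "launch",
          "submission", "finalize"]).map (fun _ => 4) := by
    rw [show pvRanked
        = (["test", "review", "quality", "tending", "garden", "refactor",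
            "cleanup", "polish", "qa", "audit"].map (fun s => (s, 0)))
          ++ (["research", "discovery", "analysis", "investigate", "explore",
            "validation", "rfp-analysis", "requirements", "study"].map (fun s => (s, 1)))
          ++ (["design", "plan", "strategy", "architect", "proposal",
            "rfp-strategy", "roadmap", "spec", "blueprint"].map (fun s => (s, 2)))
          ++ (["implement", "build", "create", "develop", "write", "coding",
            "construction", "generation", "execution", "drafting", "rfp-creation"].map (fun s => (s, 3)))
          ++ (["deploy", "release", "publish", "ship", "delivery", "launch",
            "submission", "finalize"].map (fun s => (s, 4))) from rfl]
    simp only [List.filterMap_append, pv_fm_group]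
  rw [hsplit]
  split_ifs with h0 h1 h2 h3 h4
  · rw [pv_min?_eq _ 0 ?_ (fun x _ => Nat.zero_le x)]
    · rfl
    · obtain ⟨a, ha, hqa⟩ := List.any_eq_true.mp h0
      have hm : (0 : Nat) ∈ (List.filter q _).map (fun _ => 0) :=
        List.mem_map.mpr ⟨a, List.mem_filter.mpr ⟨ha, hqa⟩, rfl⟩
      exact List.mem_append.mpr (Or.inl (List.mem_append.mpr (Or.inl (List.mem_append.mpr (Or.inl (List.mem_append.mpr (Or.inl (hm))))))))
  · rw [pv_filter_nil q _ h0]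
    rw [pv_min?_eq _ 1 ?_ ?_]
    · rfl
    · obtain ⟨a, ha, hqa⟩ := List.any_eq_true.mp h1
      have hm : (1 : Nat) ∈ (List.filter q _).map (fun _ => 1) :=
        List.mem_map.mpr ⟨a, List.mem_filter.mpr ⟨ha, hqa⟩, rfl⟩
      exact List.mem_append.mpr (Or.inl (List.mem_append.mpr (Or.inl (List.mem_append.mpr (Or.inl (List.mem_append.mpr (Or.inr hm)))))))
    · intro x hx
      simp only [List.map_nil, List.nil_append, List.mem_append, List.mem_map,
        List.mem_filter] at hx
      rcases hx with ⟨_,_,h⟩|⟨_,_,h⟩|⟨_,_,h⟩|⟨_,_,h⟩ <;> omega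
  · rw [pv_filter_nil q _ h0, pv_filter_nil q _ h1]
    rw [pv_min?_eq _ 2 ?_ ?_]
    · rfl
    · obtain ⟨a, ha, hqa⟩ := List.any_eq_true.mp h2
      have hm : (2 : Nat) ∈ (List.filter q _).map (fun _ => 2) :=
        List.mem_map.mpr ⟨a, List.mem_filter.mpr ⟨ha, hqa⟩, rfl⟩
      exact List.mem_append.mpr (Or.inl (List.mem_append.mpr (Or.inl (List.mem_append.mpr (Or.inr hm)))))
    · intro x hx
      simp only [List.map_nil, List.nil_append, List.mem_append, List.mem_map,
        List.mem_filter] at hx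
      rcases hx with ⟨_,_,h⟩|⟨_,_,h⟩|⟨_,_,h⟩ <;> omega
  · rw [pv_filter_nil q _ h0, pv_filter_nil q _ h1, pv_filter_nil q _ h2]
    rw [pv_min?_eq _ 3 ?_ ?_]
    · rfl
    · obtain ⟨a, ha, hqa⟩ := List.any_eq_true.mp h3
      have hm : (3 : Nat) ∈ (List.filter q _).map (fun _ => 3) :=
        List.mem_map.mpr ⟨a, List.mem_filter.mpr ⟨ha, hqa⟩, rfl⟩
      exact List.mem_append.mpr (Or.inl (List.mem_append.mpr (Or.inr hm)))
    · intro x hx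
      simp only [List.map_nil, List.nil_append, List.mem_append, List.mem_map,
        List.mem_filter] at hx
      rcases hx with ⟨_,_,h⟩|⟨_,_,h⟩ <;> omega
  · rw [pv_filter_nil q _ h0, pv_filter_nil q _ h1, pv_filter_nil q _ h2, pv_filter_nil q _ h3]
    rw [pv_min?_eq _ 4 ?_ ?_]
    · rfl
    · obtain ⟨a, ha, hqa⟩ := List.any_eq_true.mp h4
      have hm : (4 : Nat) ∈ (List.filter q _).map (fun _ => 4) :=
        List.mem_map.mpr ⟨a, List.mem_filter.mpr ⟨ha, hqa⟩, rfl⟩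
      exact List.mem_append.mpr (Or.inr hm)
    · intro x hx
      simp only [List.map_nil, List.nil_append, List.mem_map,
        List.mem_filter] at hx
      rcases hx with ⟨_,_,h⟩; omega
  · rw [pv_filter_nil q _ h0, pv_filter_nil q _ h1, pv_filter_nil q _ h2, pv_filter_nil q _ h3, pv_filter_nil q _ h4]
    rfl

-- ===== VERDICT (by name: the statement is the Claim_ definition above) =====
theorem infer_triad_type_spec : Claim_equal_infer_triad_type := by
  intro triad_id _
  exact pv_chain_eq (fun kw => PySem.Str.isIn kw (PySem.Str.lower triad_id))
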